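-- pv_equiv track=rewrite | github.com/nbgraham/PACCS_Parking_Courses | course_blocks/old_estimates/tricourse.py | all_distinct_groups
-- ===== SOURCE A (Python) =====
-- def all_distinct_groups(element_list, group_size=1):
--     aux_list = list(element_list)
--     for course in element_list:
--         aux_list.remove(course)
--         if group_size == 1:
--             yield [course]
--         else:
--             for courses in all_distinct_groups(aux_list, group_size-1):
--                 yield [course] + courses
-- ===== SOURCE B (Python) =====
-- def all_distinct_groups(element_list, group_size=1):
--     # Bottom-up dynamic programming: one right-to-left pass maintaining, for each
--     # size s <= group_size, the list of size-s groups of the current suffix.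
--     if group_size < 1:
--         return
--     L = list(element_list)
--     if group_size > len(L):
--         return
--     table = [[[]]] + [[] for _ in range(group_size)]
--     for x in reversed(L):
--         table = [table[0]] + [[[x] + c for c in prev] + cur
--                               for prev, cur in zip(table, table[1:])]
--     yield from table[group_size]
-- ===== Notes on version B (the rewrite author's own statement) =====
-- stated objective: alternative
-- what changed: Replaces A's per-element recursive generator (recursing on group_size with a shrinking aux list) by a bottom-up dynamic program: one right-to-left pass over the list maintaining, for every size s <= group_size, the list of size-s groups of the current suffix.
import Mathlib
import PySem

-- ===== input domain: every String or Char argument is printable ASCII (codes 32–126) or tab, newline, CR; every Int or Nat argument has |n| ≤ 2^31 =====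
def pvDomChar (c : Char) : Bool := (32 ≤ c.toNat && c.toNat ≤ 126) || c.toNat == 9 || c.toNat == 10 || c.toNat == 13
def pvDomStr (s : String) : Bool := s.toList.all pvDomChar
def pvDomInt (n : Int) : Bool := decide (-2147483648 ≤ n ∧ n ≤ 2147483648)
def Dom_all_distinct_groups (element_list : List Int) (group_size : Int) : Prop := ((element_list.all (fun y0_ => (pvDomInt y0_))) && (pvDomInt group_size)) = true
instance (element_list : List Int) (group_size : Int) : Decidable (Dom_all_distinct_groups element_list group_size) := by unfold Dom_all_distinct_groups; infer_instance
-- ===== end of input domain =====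

-- B replaces A's per-element recursive generator by a one-pass dynamic program over
-- group sizes (objective: alternative, same cost).  Both are ported as the list of
-- the generator's yields.

-- ===== PORT A =====
-- termination helper for the port of A (cited by its decreasing_by)
theorem pvRemoveGetD_len (aux : List Int) (c : Int) :
    ((PySem.List.remove? aux c).getD []).length < aux.length ∨
      (aux = [] ∧ (PySem.List.remove? aux c).getD [] = []) := by
  cases h : PySem.List.remove? aux c with
  | none =>
    cases aux with
    | nil => right; simp
    | cons a t => left; simp
  | some l =>
    left
    have hm : c ∈ aux := by
      by_contra hc
      rw [(PySem.List.remove?_eq_none_iff aux c).mpr hc] at h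
      simp at h
    have he := PySem.List.remove?_eq_some_erase aux c hm
    rw [h] at he
    have hl : l = aux.erase c := by injection he
    have hlen := List.length_erase_of_mem hm
    have hpos : 0 < aux.length := List.length_pos_of_mem hm
    simp only [Option.getD_some, hl, hlen]
    omega

-- the generator's body: 'rest' is what remains of 'for course in element_list', and
-- '(PySem.List.remove? aux course).getD []' is aux_list after 'aux_list.remove(course)'
-- (list.remove's ValueError is unreachable: course is always in aux in A's calls).
def pvGoA (aux rest : List Int) (gs : Int) : List (List Int) :=
  match rest with
  | [] => []
  | course :: rest' =>
    (if gs == 1 then [[course]]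
     else (pvGoA ((PySem.List.remove? aux course).getD [])
                 ((PySem.List.remove? aux course).getD []) (gs - 1)).map
            (fun cs => course :: cs)) ++
      pvGoA ((PySem.List.remove? aux course).getD []) rest' gs
termination_by (aux.length, rest.length)
decreasing_by
  · rcases pvRemoveGetD_len aux course with h | ⟨h1, h2⟩
    · exact Prod.Lex.left _ _ h
    · subst h1; rw [h2]; exact Prod.Lex.right _ (by simp)
  · rcases pvRemoveGetD_len aux course with h | ⟨h1, h2⟩
    · exact Prod.Lex.left _ _ h
    · subst h1; rw [h2]; exact Prod.Lex.right _ (by simp)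

def all_distinct_groups (element_list : List Int) (group_size : Int) : List (List Int) :=
  pvGoA element_list element_list group_size

-- ===== PORT B =====
-- table = [table[0]] + [[[x]+c for c in prev] + cur for prev, cur in zip(table, table[1:])]
def pvStepB (x : Int) (table : List (List (List Int))) : List (List (List Int)) :=
  match table with
  | [] => []
  | t0 :: _ => t0 :: (List.zipWith (fun prev cur => prev.map (fun c => x :: c) ++ cur) table table.tail)

def all_distinct_groups_alt (element_list : List Int) (group_size : Int) : List (List Int) :=
  if group_size < 1 then []
  else if (element_list.length : Int) < group_size then []
  else
    -- table = [[[]]] + [[] for _ in range(group_size)], folded over reversed(L),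
    -- then table[group_size] (the index is always in range, so the .getD [] default is dead)
    (PySem.List.pyGet?
      (element_list.reverse.foldl (fun t x => pvStepB x t)
        ([[([] : List Int)]] ++ List.replicate group_size.toNat []))
      group_size).getD []

-- ===== PRECONDITION & SPEC =====
def Spec_all_distinct_groups (element_list : List Int) (group_size : Int) (out : List (List Int)) : Prop := out = all_distinct_groups_alt element_list group_size
instance (element_list : List Int) (group_size : Int) (out : List (List Int)) : Decidable (Spec_all_distinct_groups element_list group_size out) := by unfold Spec_all_distinct_groups; infer_instance

-- ===== CLAIM (what is proved, stated in full; the proofs are below) =====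
def Claim_equal_all_distinct_groups : Prop := ∀ (element_list : List Int) (group_size : Int), Dom_all_distinct_groups element_list group_size → Spec_all_distinct_groups element_list group_size (all_distinct_groups element_list group_size)

-- ===== LEMMAS AND PROOFS =====

-- the mathematical combinations function both ports compute
def pvC : List Int → Nat → List (List Int)
  | _, 0 => [[]]
  | [], _ + 1 => []
  | x :: rest, s + 1 => (pvC rest s).map (fun c => x :: c) ++ pvC rest (s + 1)

theorem pvGoA_eq (rest : List Int) : ∀ gs : Int,
    pvGoA rest rest gs = if gs < 1 then [] else pvC rest gs.toNat := by
  induction rest with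
  | nil =>
    intro gs
    rw [pvGoA]
    split
    · rfl
    · rename_i h
      obtain ⟨s, hs⟩ : ∃ s, gs.toNat = s + 1 := ⟨(gs - 1).toNat, by omega⟩
      rw [hs, pvC]
  | cons c r' ih =>
    intro gs
    rw [pvGoA]
    simp only [PySem.List.remove?_cons_self, Option.getD_some]
    by_cases h1 : gs = 1
    · subst h1
      simp [ih 1, pvC]
    · rw [if_neg (show ¬((gs == 1) = true) by simp [h1])]
      by_cases hlt : gs < 1
      · rw [ih (gs - 1), ih gs, if_pos (by omega), if_pos hlt, if_pos hlt]
        simp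
      · obtain ⟨s, hs⟩ : ∃ s, gs.toNat = s + 1 := ⟨(gs - 1).toNat, by omega⟩
        rw [ih (gs - 1), ih gs, if_neg (by omega), if_neg hlt, if_neg hlt, hs, pvC]
        have : (gs - 1).toNat = s := by omega
        rw [this]

theorem pvTable0_eq (k : Nat) :
    [[([] : List Int)]] ++ List.replicate k [] = (List.range (k + 1)).map (pvC []) := by
  apply List.ext_getElem
  · simp
  · intro i h1 h2
    simp only [List.getElem_map, List.getElem_range]
    cases i with
    | zero => simp [pvC]
    | succ j =>
      simp only [List.cons_append, List.nil_append] at *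
      rw [List.getElem_cons_succ, List.getElem_replicate, pvC]

theorem pvStepB_eq (x : Int) (l : List Int) (k : Nat) :
    pvStepB x ((List.range (k + 1)).map (pvC l)) = (List.range (k + 1)).map (pvC (x :: l)) := by
  obtain ⟨t0, ts, ht⟩ := List.exists_cons_of_ne_nil
    (show (List.range (k + 1)).map (pvC l) ≠ [] by simp)
  have hA : ∀ i : Nat, (t0 :: ts)[i]? = ((List.range (k + 1)).map (pvC l))[i]? := by
    intro i; rw [ht]
  have hAlt : ∀ i : Nat, i < k + 1 → (t0 :: ts)[i]? = some (pvC l i) := by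
    intro i h
    rw [hA i, List.getElem?_map, List.getElem?_range h, Option.map_some]
  have hAge : ∀ i : Nat, k + 1 ≤ i → (t0 :: ts)[i]? = none := by
    intro i h
    rw [hA i]
    apply List.getElem?_eq_none
    simpa using h
  have ht0 : t0 = pvC l 0 := by
    have h0 := hAlt 0 (by omega)
    rw [List.getElem?_cons_zero] at h0
    exact Option.some.inj h0
  rw [ht, pvStepB]
  apply List.ext_getElem?
  intro i
  rw [List.getElem?_map]
  cases i with
  | zero =>
    rw [List.getElem?_cons_zero, List.getElem?_range (by omega), Option.map_some, ht0]
    simp [pvC]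
  | succ j =>
    rw [List.getElem?_cons_succ, List.getElem?_zipWith, List.tail_cons]
    by_cases hj : j + 1 < k + 1
    · rw [hAlt j (by omega)]
      have hts : ts[j]? = some (pvC l (j + 1)) := by
        rw [← List.getElem?_cons_succ (a := t0)]
        exact hAlt (j + 1) hj
      rw [hts, List.getElem?_range hj, Option.map_some]
      simp [pvC]
    · have hts : ts[j]? = none := by
        rw [← List.getElem?_cons_succ (a := t0)]
        exact hAge (j + 1) (by omega)
      have hr : (List.range (k + 1))[j + 1]? = none := List.getElem?_eq_none (by simp; omega)
      rw [hts, hr, Option.map_none]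
      cases h' : (t0 :: ts)[j]? <;> simp

theorem pvFold_eq (l : List Int) (k : Nat) :
    l.reverse.foldl (fun t x => pvStepB x t) ([[([] : List Int)]] ++ List.replicate k []) =
      (List.range (k + 1)).map (pvC l) := by
  rw [List.foldl_reverse, pvTable0_eq]
  induction l with
  | nil => rfl
  | cons x rest ih => rw [List.foldr_cons, ih, pvStepB_eq]

theorem pvC_eq_nil : ∀ (l : List Int) (k : Nat), l.length < k → pvC l k = [] := by
  intro l
  induction l with
  | nil =>
    intro k hk
    cases k with
    | zero => omega
    | succ s => rw [pvC]
  | cons x r ih =>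
    intro k hk
    cases k with
    | zero => omega
    | succ s =>
      rw [pvC, ih s (by simpa using hk), ih (s + 1) (by simp at hk; omega)]
      simp

theorem pvAlt_eq (l : List Int) (gs : Int) :
    all_distinct_groups_alt l gs =
      if gs < 1 then [] else if (l.length : Int) < gs then [] else pvC l gs.toNat := by
  unfold all_distinct_groups_alt
  split
  · rfl
  · rename_i h
    split
    · rfl
    · rw [pvFold_eq l gs.toNat, PySem.List.pyGet?_of_nonneg _ (by omega : (0:Int) ≤ gs),
          List.getElem?_map, List.getElem?_range (Nat.lt_succ_self _), Option.map_some,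
          Option.getD_some]

-- ===== VERDICT (by name: the statement is the Claim_ definition above) =====
theorem all_distinct_groups_spec : Claim_equal_all_distinct_groups := by
  intro el gs _
  unfold Spec_all_distinct_groups
  rw [all_distinct_groups, pvGoA_eq, pvAlt_eq]
  split
  · rfl
  · rename_i h
    split
    · rename_i h2
      exact pvC_eq_nil el gs.toNat (by omega)
    · rfl
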